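-- pv_equiv track=rewrite | github.com/keaniqan/TreeBasedSearch | AI_AS2B/visualize_original.py | split_csv_allow_commas
-- ===== SOURCE A (Python) =====
-- def split_csv_allow_commas(line, min_fields):
--     parts = []
--     buf = []
--     depth = 0
--     for ch in line:
--         if ch == '(':
--             depth += 1
--             buf.append(ch)
--         elif ch == ')':
--             depth = max(depth - 1, 0)
--             buf.append(ch)
--         elif ch == ',':
--             if depth == 0:
--                 parts.append("".join(buf).strip())
--                 buf = []
--             else:
--                 buf.append(ch)
--         else:
--             buf.append(ch)
--     if buf:
--         parts.append("".join(buf).strip())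
--     if len(parts) < min_fields:
--         raise ValueError(f"Line '{line}' parsed into too few fields: {parts}")
--     return parts
-- ===== SOURCE B (Python) =====
-- def split_csv_allow_commas(line, min_fields):
--     # pass 1: record the index of every comma at parenthesis depth 0
--     bounds = []
--     depth = 0
--     for i, ch in enumerate(line):
--         if ch == '(':
--             depth += 1
--         elif ch == ')':
--             depth = max(depth - 1, 0)
--         elif ch == ',' and depth == 0:
--             bounds.append(i)
--     # pass 2: slice the line between consecutive boundaries
--     parts = []
--     start = 0
--     for b in bounds:
--         parts.append(line[start:b].strip())
--         start = b + 1
--     if start < len(line):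
--         parts.append(line[start:].strip())
--     if len(parts) < min_fields:
--         raise ValueError(f"Line '{line}' parsed into too few fields: {parts}")
--     return parts
-- ===== Notes on version B (the rewrite author's own statement) =====
-- stated objective: alternative
-- what changed: A accumulates characters into a buffer inside one fused loop; B first collects the indices of all depth-0 commas in one pass, then builds the fields by slicing the original line between consecutive boundary indices.
import Mathlib
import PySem

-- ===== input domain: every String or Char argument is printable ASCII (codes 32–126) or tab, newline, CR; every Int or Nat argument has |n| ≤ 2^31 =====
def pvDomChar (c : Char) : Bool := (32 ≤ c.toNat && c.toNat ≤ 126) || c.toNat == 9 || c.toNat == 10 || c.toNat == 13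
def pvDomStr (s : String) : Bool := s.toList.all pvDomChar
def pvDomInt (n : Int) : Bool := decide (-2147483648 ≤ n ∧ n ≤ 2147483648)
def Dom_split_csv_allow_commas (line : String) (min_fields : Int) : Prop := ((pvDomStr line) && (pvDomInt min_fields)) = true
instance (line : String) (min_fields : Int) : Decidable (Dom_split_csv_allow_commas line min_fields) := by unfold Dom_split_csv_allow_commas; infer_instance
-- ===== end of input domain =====

-- B replaces A's fused accumulate-into-a-buffer loop by two passes — collect the indices of the
-- depth-0 commas, then slice the line between consecutive boundaries (objective: alternative).
-- The ValueError branch (fewer fields than min_fields) is excluded by Pre_.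

-- ===== PORT A =====
-- A's single loop: state (parts, buf, depth); Python's max(depth-1,0) is Nat subtraction.
def pvALoop : List Char → List String → List Char → Nat → List String
  | [], parts, buf, _ =>
      if buf ≠ [] then parts ++ [String.ofList (PySem.Chars.strip buf)] else parts
  | c :: cs, parts, buf, d =>
      if c = '(' then pvALoop cs parts (buf ++ [c]) (d + 1)
      else if c = ')' then pvALoop cs parts (buf ++ [c]) (d - 1)
      else if c = ',' then
        if d = 0 then pvALoop cs (parts ++ [String.ofList (PySem.Chars.strip buf)]) [] d
        else pvALoop cs parts (buf ++ [c]) d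
      else pvALoop cs parts (buf ++ [c]) d

-- the final `raise` when len(parts) < min_fields is outside Pre_; the port returns parts
def split_csv_allow_commas (line : String) (min_fields : Int) : List String :=
  pvALoop line.toList [] [] 0

-- ===== PORT B =====
-- pass 1: `for i, ch in enumerate(line)` collecting indices of depth-0 commas into `bounds`
def pvBLoop1 : List Char → Nat → Nat → List Nat → List Nat
  | [], _, _, bounds => bounds
  | c :: cs, i, d, bounds =>
      if c = '(' then pvBLoop1 cs (i + 1) (d + 1) bounds
      else if c = ')' then pvBLoop1 cs (i + 1) (d - 1) bounds
      else if c = ',' then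
        if d = 0 then pvBLoop1 cs (i + 1) d (bounds ++ [i])
        else pvBLoop1 cs (i + 1) d bounds
      else pvBLoop1 cs (i + 1) d bounds

-- pass 2: `for b in bounds: parts.append(line[start:b].strip()); start = b+1`, then the tail slice
def pvBLoop2 (line : List Char) : List Nat → List String → Nat → List String
  | [], parts, start =>
      if start < line.length
      then parts ++ [String.ofList (PySem.Chars.strip (PySem.List.slice line (some (start : Int)) none))]
      else parts
  | b :: bs, parts, start =>
      pvBLoop2 line bs
        (parts ++ [String.ofList (PySem.Chars.strip (PySem.List.slice line (some (start : Int)) (some (b : Int))))])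
        (b + 1)

def split_csv_allow_commas_alt (line : String) (min_fields : Int) : List String :=
  pvBLoop2 line.toList (pvBLoop1 line.toList 0 0 []) [] 0

-- ===== PRECONDITION & SPEC =====
-- number of fields the line parses into: depth-0 commas, plus one if the trailing buffer is nonempty
def pvFieldCount : List Char → Nat → Nat → Bool → Nat
  | [], _, n, bufNE => n + (if bufNE then 1 else 0)
  | c :: cs, d, n, _ =>
      if c = '(' then pvFieldCount cs (d + 1) n true
      else if c = ')' then pvFieldCount cs (d - 1) n true
      else if c = ',' then
        if d = 0 then pvFieldCount cs d (n + 1) false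
        else pvFieldCount cs d n true
      else pvFieldCount cs d n true

-- Pre_ excludes exactly the inputs where A raises ValueError: a line that parses into fewer than
-- min_fields top-level fields (the count is stated by an independent depth scan, not by either port).
def Pre_split_csv_allow_commas (line : String) (min_fields : Int) : Prop :=
  min_fields ≤ (pvFieldCount line.toList 0 0 false : Int)
instance (line : String) (min_fields : Int) : Decidable (Pre_split_csv_allow_commas line min_fields) := by
  unfold Pre_split_csv_allow_commas; infer_instance

def pvWitness_split_csv_allow_commas : String × Int := ("a,(b, c), d", 3)

def Spec_split_csv_allow_commas (line : String) (min_fields : Int) (out : List String) : Prop :=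
  out = split_csv_allow_commas_alt line min_fields
instance (line : String) (min_fields : Int) (out : List String) : Decidable (Spec_split_csv_allow_commas line min_fields out) := by
  unfold Spec_split_csv_allow_commas; infer_instance

-- ===== CLAIM (what is proved, stated in full; the proofs are below) =====
def Claim_equal_split_csv_allow_commas : Prop := ∀ (line : String) (min_fields : Int), Dom_split_csv_allow_commas line min_fields → Pre_split_csv_allow_commas line min_fields → Spec_split_csv_allow_commas line min_fields (split_csv_allow_commas line min_fields)

-- ===== LEMMAS AND PROOFS =====

lemma pvBLoop1_acc (cs : List Char) : ∀ (i d : Nat) (acc : List Nat),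
    pvBLoop1 cs i d acc = acc ++ pvBLoop1 cs i d [] := by
  induction cs with
  | nil => intro i d acc; simp [pvBLoop1]
  | cons c cs ih =>
      intro i d acc
      by_cases h1 : c = '(' <;> by_cases h2 : c = ')' <;> by_cases h3 : c = ','
      all_goals simp [pvBLoop1, h1, h2, h3]
      all_goals try (split <;> [rw [ih, ih _ _ [i]]; rw [ih]]) <;> simp
      all_goals rw [ih, ih _ _ _]

lemma pvKey (ls : List Char) : ∀ (cs : List Char) (i start : Nat) (parts : List String) (d : Nat),
    start ≤ i → cs = ls.drop i →
    pvALoop cs parts ((ls.take i).drop start) d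
      = pvBLoop2 ls (pvBLoop1 cs i d []) parts start := by
  intro cs
  induction cs with
  | nil =>
      intro i start parts d hsi hcs
      have hlen : ls.length ≤ i := by
        by_contra h
        have := List.drop_eq_nil_iff.mp hcs.symm
        omega
      have htake : ls.take i = ls := List.take_of_length_le hlen
      rw [htake]
      simp only [pvALoop, pvBLoop1, pvBLoop2]
      rw [PySem.List.slice_from_natCast]
      have hne : ls.drop start ≠ [] ↔ start < ls.length := by
        rw [ne_eq, List.drop_eq_nil_iff]; omega
      split <;> split <;> simp_all
  | cons c cs ih =>
      intro i start parts d hsi hcs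
      have hi : i < ls.length := by
        by_contra h
        have hnil : ls.drop i = [] := List.drop_eq_nil_iff.mpr (by omega)
        rw [hnil] at hcs
        exact (List.cons_ne_nil c cs) hcs
      have hc : ls[i] = c := by
        have h0 : (ls.drop i)[0]? = some c := by rw [← hcs]; rfl
        rw [List.getElem?_drop, Nat.add_zero, List.getElem?_eq_getElem hi] at h0
        exact Option.some.inj h0
      have hcs' : cs = ls.drop (i + 1) := by
        have ht : ls.drop (i + 1) = (ls.drop i).tail := by rw [List.tail_drop]
        rw [ht, ← hcs, List.tail_cons]
      have htake1 : ls.take (i + 1) = ls.take i ++ [c] := by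
        rw [List.take_add_one]
        simp [List.getElem?_eq_getElem hi, hc]
      have hbufgrow : (ls.take i).drop start ++ [c] = (ls.take (i + 1)).drop start := by
        rw [htake1, List.drop_append_of_le_length (by simp; omega)]
      simp only [pvALoop, pvBLoop1]
      by_cases h1 : c = '('
      · rw [if_pos h1, if_pos h1, hbufgrow]
        exact ih (i + 1) start parts (d + 1) (by omega) hcs'
      rw [if_neg h1, if_neg h1]
      by_cases h2 : c = ')'
      · rw [if_pos h2, if_pos h2, hbufgrow]
        exact ih (i + 1) start parts (d - 1) (by omega) hcs'
      rw [if_neg h2, if_neg h2]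
      by_cases h3 : c = ','
      · rw [if_pos h3, if_pos h3]
        by_cases hd : d = 0
        · rw [if_pos hd, if_pos hd]
          rw [pvBLoop1_acc]
          simp only [List.nil_append, List.singleton_append, pvBLoop2]
          have hslice : PySem.List.slice ls (some (start : Int)) (some (i : Int))
              = (ls.take i).drop start := by
            rw [PySem.List.slice_natCast, List.drop_take]
          rw [hslice]
          have hbuf' : ([] : List Char) = (ls.take (i + 1)).drop (i + 1) := by
            rw [List.drop_eq_nil_iff.mpr (by simp)]
          rw [hbuf']
          exact ih (i + 1) (i + 1) _ d (by omega) hcs'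
        · rw [if_neg hd, if_neg hd, hbufgrow]
          exact ih (i + 1) start parts d (by omega) hcs'
      rw [if_neg h3, if_neg h3, hbufgrow]
      exact ih (i + 1) start parts d (by omega) hcs'

-- ===== VERDICT (by name: the statement is the Claim_ definition above) =====
theorem split_csv_allow_commas_spec : Claim_equal_split_csv_allow_commas := by
  intro line min_fields _ _
  unfold Spec_split_csv_allow_commas split_csv_allow_commas split_csv_allow_commas_alt
  have := pvKey line.toList line.toList 0 0 [] 0 (by omega) (by simp)
  simpa using this
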